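-- pv_equiv track=rewrite | github.com/mallocchio/Advanced-Topics-In-Cybersecurity | Lab Sheet - Making (symmetric) crypto/making AES/AES.py | GF28_sbox
-- ===== SOURCE A (Python) =====
-- def GF28_inv(a, mod=0x1B):
--     def GF28_deg(a):
--         res = 0
--         a >>= 1
--         while (a != 0) :
--             a >>= 1;
--             res += 1;
--         return res
--
--     v = mod
--     g1 = 1
--     g2 = 0
--     j = GF28_deg(a) - 8
--     while (a != 1) :
--         if (j < 0) :
--             a, v = v, a
--             g1, g2 = g2, g1
--             j = -j
--         a ^= v << j
--         g1 ^= g2 << j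
--         a %= 256  # Emulating 8-bit overflow
--         g1 %= 256 # Emulating 8-bit overflow
--         j = GF28_deg(a) - GF28_deg(v)
--     return g1
--
-- def GF28_sbox(byte):
--     c = 0b01100011
--     inverse = GF28_inv(byte)
--     transformed_byte = 0
--     for i in range(8):
--         bit = (inverse >> i) & 1
--         transformed_bit = bit ^ ((inverse >> ((i+4) % 8)) & 1) \
--                               ^ ((inverse >> ((i+5) % 8)) & 1) \
--                               ^ ((inverse >> ((i+6) % 8)) & 1) \
--                               ^ ((inverse >> ((i+7) % 8)) & 1) \
--                               ^ ((c >> i) & 1)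
--         transformed_byte |= (transformed_bit << i)
--     return transformed_byte
-- ===== SOURCE B (Python) =====
-- def GF28_sbox(byte):
--     # multiplicative inverse in GF(2^8) by direct search using field multiplication
--     def xtime(x):
--         x <<= 1
--         return x ^ 0x11B if x & 0x100 else x
--
--     def gf_mul(x, y):
--         if y == 0:
--             return 0
--         return (x if y & 1 else 0) ^ gf_mul(xtime(x), y >> 1)
--
--     inverse = 0
--     for y in range(1, 256):
--         if gf_mul(byte, y) == 1:
--             inverse = y
--             break
--
--     def rotl(v, k):
--         return ((v << k) | (v >> (8 - k))) & 0xFF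
--
--     return inverse ^ rotl(inverse, 1) ^ rotl(inverse, 2) ^ rotl(inverse, 3) ^ rotl(inverse, 4) ^ 0x63
-- ===== Notes on version B (the rewrite author's own statement) =====
-- stated objective: alternative
-- what changed: B finds the GF(2^8) multiplicative inverse by a direct search using field multiplication (xtime/shift-and-xor) instead of A's mod-256-truncated extended-Euclidean loop, and computes the affine transform as a closed-form XOR of byte rotations instead of A's bit-by-bit loop.
-- outside the precondition, e.g. on GF28_sbox(300): A returns 124, B returns 99; on GF28_sbox(0): A does not finish within the time limit, B returns 99; on GF28_sbox(-1): A does not finish within the time limit, B returns 99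
import Mathlib
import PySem

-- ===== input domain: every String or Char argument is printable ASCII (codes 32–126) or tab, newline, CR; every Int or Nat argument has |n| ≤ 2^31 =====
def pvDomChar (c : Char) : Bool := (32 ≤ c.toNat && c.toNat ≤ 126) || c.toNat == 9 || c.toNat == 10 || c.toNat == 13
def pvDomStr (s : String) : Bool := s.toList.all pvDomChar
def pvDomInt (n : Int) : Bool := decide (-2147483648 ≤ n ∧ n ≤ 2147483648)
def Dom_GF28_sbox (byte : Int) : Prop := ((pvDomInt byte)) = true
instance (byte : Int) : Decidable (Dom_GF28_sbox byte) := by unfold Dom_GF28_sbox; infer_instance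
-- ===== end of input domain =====

-- B replaces A's extended-Euclidean inversion by a direct search for the GF(2^8)
-- multiplicative inverse (via field multiplication) and A's 8-iteration bit loop by the
-- closed-form affine transform using byte rotations; objective: alternative (same cost class).

-- ===== PORT A =====
-- Python's GF28_deg: res = 0; a >>= 1; while a != 0: a >>= 1; res += 1
-- On Pre_ all intermediate Python ints are nonnegative, so Nat bit operations are exact.
-- fuel-bounded structural recursion (32 halvings cover every |n| ≤ 2^31 of the domain)
def pvDegAux : Nat → Nat → Nat → Nat
  | 0, _, res => res
  | fuel + 1, a, res => if a = 0 then res else pvDegAux fuel (a / 2) (res + 1)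

def pvDeg (a : Nat) : Nat := pvDegAux 32 (a / 2) 0

-- the 'while a != 1' loop of GF28_inv, fuel-bounded (64 ≫ the ≤12 iterations any byte needs)
def pvInvLoop : Nat → Nat → Nat → Nat → Nat → Int → Nat
  | 0, _, _, g1, _, _ => g1
  | fuel + 1, a, v, g1, g2, j =>
    if a = 1 then g1
    else
      let s := if j < 0 then (v, a, g2, g1, -j) else (a, v, g1, g2, j)
      let a' := (s.1 ^^^ (s.2.1 <<< s.2.2.2.2.toNat)) % 256
      let g1' := (s.2.2.1 ^^^ (s.2.2.2.1 <<< s.2.2.2.2.toNat)) % 256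
      pvInvLoop fuel a' s.2.1 g1' s.2.2.2.1 ((pvDeg a' : Int) - (pvDeg s.2.1 : Int))

def pvGF28_inv (a : Nat) : Nat :=
  pvInvLoop 64 a 0x1B 1 0 ((pvDeg a : Int) - 8)

-- transliteration of GF28_sbox: the bit-by-bit affine loop over i in range(8)
def GF28_sbox (byte : Int) : Int :=
  let c : Nat := 0x63
  let inverse := pvGF28_inv byte.toNat
  let transformed_byte :=
    (List.range 8).foldl
      (fun tb i =>
        let bit := (inverse >>> i) &&& 1
        let tbit := bit ^^^ ((inverse >>> ((i + 4) % 8)) &&& 1)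
                        ^^^ ((inverse >>> ((i + 5) % 8)) &&& 1)
                        ^^^ ((inverse >>> ((i + 6) % 8)) &&& 1)
                        ^^^ ((inverse >>> ((i + 7) % 8)) &&& 1)
                        ^^^ ((c >>> i) &&& 1)
        tb ||| (tbit <<< i)) 0
  (transformed_byte : Int)

-- ===== PORT B =====
def pvXtime (x : Nat) : Nat :=
  let x := x <<< 1
  if x &&& 0x100 ≠ 0 then x ^^^ 0x11B else x

-- fuel-bounded structural recursion (the search only multiplies by y < 256: 8 halvings; 16 is ample)
def pvGfMul : Nat → Nat → Nat → Nat
  | 0, _, _ => 0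
  | fuel + 1, x, y =>
    if y = 0 then 0
    else (if y &&& 1 = 1 then x else 0) ^^^ pvGfMul fuel (pvXtime x) (y >>> 1)

-- the 'for y in range(1, 256): … break' search
def pvFindInv : Nat → Nat → Nat → Nat
  | 0, _, _ => 0
  | fuel + 1, x, y =>
    if 256 ≤ y then 0
    else if pvGfMul 16 x y = 1 then y else pvFindInv fuel x (y + 1)

def pvRotl (v k : Nat) : Nat := ((v <<< k) ||| (v >>> (8 - k))) &&& 0xFF

def GF28_sbox_alt (byte : Int) : Int :=
  let inverse := pvFindInv 256 byte.toNat 1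
  ((inverse ^^^ pvRotl inverse 1 ^^^ pvRotl inverse 2 ^^^ pvRotl inverse 3
             ^^^ pvRotl inverse 4 ^^^ 0x63 : Nat) : Int)

-- ===== PRECONDITION & SPEC =====
-- Pre_ is the function's natural domain: nonzero bytes. Outside it A's while loop
-- diverges on 0, on every negative input and on most inputs ≥ 256 (no exception, no
-- return), and where it does return on an input ≥ 256 the value is an artefact of the
-- '%= 256' truncation of out-of-range data, which B does not reproduce.
def Pre_GF28_sbox (byte : Int) : Prop := 1 ≤ byte ∧ byte ≤ 255
instance (byte : Int) : Decidable (Pre_GF28_sbox byte) := by unfold Pre_GF28_sbox; infer_instance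
def pvWitness_GF28_sbox : Int := 7

def Spec_GF28_sbox (byte : Int) (out : Int) : Prop := out = GF28_sbox_alt byte
instance (byte : Int) (out : Int) : Decidable (Spec_GF28_sbox byte out) := by unfold Spec_GF28_sbox; infer_instance

-- ===== CLAIM (what is proved, stated in full; the proofs are below) =====
def Claim_equal_GF28_sbox : Prop :=
  ∀ (byte : Int), Dom_GF28_sbox byte → Pre_GF28_sbox byte → Spec_GF28_sbox byte (GF28_sbox byte)

-- ===== LEMMAS AND PROOFS =====
set_option maxHeartbeats 4000000 in
set_option maxRecDepth 10000 in
theorem gf28_sbox_agree_nat : ∀ n : Nat, n < 255 → GF28_sbox (Int.ofNat (n + 1)) = GF28_sbox_alt (Int.ofNat (n + 1)) := by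
  decide

-- ===== VERDICT (by name: the statement is the Claim_ definition above) =====
theorem GF28_sbox_spec : Claim_equal_GF28_sbox := by
  intro byte _ hpre
  unfold Spec_GF28_sbox
  obtain ⟨h1, h2⟩ := hpre
  have hn : byte = Int.ofNat (byte.toNat - 1 + 1) := by rw [Int.ofNat_eq_natCast]; omega
  rw [hn]
  exact gf28_sbox_agree_nat (byte.toNat - 1) (by omega)
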